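-- pv_equiv track=rewrite | github.com/thytom/AOC2020 | src/day5/python/part1.py | bsp
-- ===== SOURCE A (Python) =====
-- def bsp(string, arr):
--     head, *rest = string
--     array = arr
--     if rest == []:
--         return array[0]
--     if head == 'F' or head == 'L':
--         return bsp(rest, array[0:int(len(array)/2)])
--     elif head == 'B' or head == 'R':
--         return bsp(rest, array[int(len(array)/2):len(array)])
-- ===== SOURCE B (Python) =====
-- def bsp(string, arr):
--     lo, hi = 0, len(arr)
--     for c in string[:-1]:
--         if c == 'F' or c == 'L':
--             hi = lo + (hi - lo) // 2
--         elif c == 'B' or c == 'R':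
--             lo = lo + (hi - lo) // 2
--         else:
--             raise ValueError("invalid character: " + c)
--     return arr[lo]
-- ===== Notes on version B (the rewrite author's own statement) =====
-- stated objective: simpler
-- what changed: recursion that slices the list in half at every step is replaced by a single iterative pass keeping only a (lo,hi) index pair and one final indexing into the original list; B validates characters (raises ValueError) where A silently returns None
-- outside the precondition, e.g. on bsp('ab', [0, 1]): A returns None, B raises ValueError
import Mathlib
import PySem

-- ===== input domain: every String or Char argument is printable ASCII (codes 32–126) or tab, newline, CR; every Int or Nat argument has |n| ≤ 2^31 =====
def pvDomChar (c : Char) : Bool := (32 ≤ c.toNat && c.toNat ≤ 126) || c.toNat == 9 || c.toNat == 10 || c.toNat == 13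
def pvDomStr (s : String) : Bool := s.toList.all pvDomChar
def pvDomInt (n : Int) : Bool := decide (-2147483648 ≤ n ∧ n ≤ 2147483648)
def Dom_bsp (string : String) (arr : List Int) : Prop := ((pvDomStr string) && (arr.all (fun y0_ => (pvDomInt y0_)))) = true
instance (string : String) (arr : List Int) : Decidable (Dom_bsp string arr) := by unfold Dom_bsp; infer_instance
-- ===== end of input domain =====

-- B replaces A's recursive list-halving (which copies half the list each step) by one
-- iterative pass over the string maintaining only (lo,hi) indices, then indexes arr once.

-- ===== PORT A =====
-- A recurses on the characters, slicing the array in half each step; on the last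
-- character it returns array[0] without looking at that character.  Where Python A
-- raises (empty string, empty final slice) or returns None (other characters) the
-- port returns the junk value 0; Pre_bsp excludes exactly those inputs.
def bspA : List Char → List Int → Int
  | [], _ => 0
  | [_], array => (PySem.List.pyGet? array 0).getD 0
  | head :: rest, array =>
    if head = 'F' ∨ head = 'L' then
      bspA rest (PySem.List.slice array (some ((0 : Nat) : Int)) (some ((array.length / 2 : Nat) : Int)))
    else if head = 'B' ∨ head = 'R' then
      bspA rest (PySem.List.slice array (some ((array.length / 2 : Nat) : Int)) (some ((array.length : Nat) : Int)))
    else 0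

def bsp (string : String) (arr : List Int) : Int := bspA string.toList arr

-- ===== PORT B =====
-- none = ValueError on an invalid character; Pre_bsp excludes that path.
def bsp_alt (string : String) (arr : List Int) : Int :=
  let p := string.toList.dropLast.foldl
    (fun (st : Option (Int × Int)) c =>
      st.bind (fun s =>
        if c = 'F' ∨ c = 'L' then some (s.1, s.1 + PySem.Int.floordiv (s.2 - s.1) 2)
        else if c = 'B' ∨ c = 'R' then some (s.1 + PySem.Int.floordiv (s.2 - s.1) 2, s.2)
        else none))
    (some (((0 : Nat) : Int), ((arr.length : Nat) : Int)))
  match p with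
  | some s => (PySem.List.pyGet? arr s.1).getD 0
  | none => 0

-- ===== PRECONDITION & SPEC =====
-- pvBinVal reads the decided characters as a binary number (F/L = 0, B/R = 1, first
-- character least significant); it is used only to state when the narrowed interval
-- stays nonempty.
def pvBinVal : List Char → Nat
  | [] => 0
  | c :: cs => (if c = 'B' ∨ c = 'R' then 1 else 0) + 2 * pvBinVal cs

-- Pre_bsp holds exactly when Python A returns an int: the string is nonempty
-- (else ValueError), every character before the last is one of F/L/B/R (else A
-- falls through and returns None), and arr is long enough that the final
-- narrowed interval is nonempty (else IndexError).
def Pre_bsp (string : String) (arr : List Int) : Prop :=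
  string.toList ≠ [] ∧
  (string.toList.dropLast.all (fun c => c == 'F' || c == 'L' || c == 'B' || c == 'R')) = true ∧
  2 ^ string.toList.dropLast.length ≤ arr.length + pvBinVal string.toList.dropLast

instance (string : String) (arr : List Int) : Decidable (Pre_bsp string arr) := by
  unfold Pre_bsp; infer_instance

def pvWitness_bsp : String × List Int := ("F", [0])

def Spec_bsp (string : String) (arr : List Int) (out : Int) : Prop := out = bsp_alt string arr
instance (string : String) (arr : List Int) (out : Int) : Decidable (Spec_bsp string arr out) := by unfold Spec_bsp; infer_instance

-- ===== CLAIM (what is proved, stated in full; the proofs are below) =====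
def Claim_equal_bsp : Prop := ∀ (string : String) (arr : List Int), Dom_bsp string arr → Pre_bsp string arr → Spec_bsp string arr (bsp string arr)

-- ===== LEMMAS AND PROOFS =====

-- pvRun cs n = (relative index of the surviving cell, size of the interval) after
-- processing cs starting from an interval of size n.
def pvRun : List Char → Nat → Nat × Nat
  | [], n => (0, n)
  | c :: cs, n =>
    if c = 'F' ∨ c = 'L' then pvRun cs (n / 2)
    else (n / 2 + (pvRun cs (n - n / 2)).1, (pvRun cs (n - n / 2)).2)

theorem pvRun_size : ∀ (cs : List Char) (n : Nat),
    (∀ c ∈ cs, c = 'F' ∨ c = 'L' ∨ c = 'B' ∨ c = 'R') →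
    (pvRun cs n).2 = (n + pvBinVal cs) / 2 ^ cs.length := by
  intro cs
  induction cs with
  | nil => intro n _; simp [pvRun, pvBinVal]
  | cons c cs ih =>
    intro n hval
    have hval' : ∀ x ∈ cs, x = 'F' ∨ x = 'L' ∨ x = 'B' ∨ x = 'R' := by
      intro x hx; exact hval x (List.mem_cons_of_mem _ hx)
    by_cases hc : c = 'F' ∨ c = 'L'
    · have hb : ¬ (c = 'B' ∨ c = 'R') := by rcases hc with h | h <;> subst h <;> decide
      simp only [pvRun, pvBinVal, hc, hb, if_pos, ih _ hval']
      have h1 : n / 2 + pvBinVal cs = (n + (0 + 2 * pvBinVal cs)) / 2 := by omega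
      rw [h1, Nat.div_div_eq_div_mul, List.length_cons, pow_succ,
        Nat.mul_comm (2 ^ cs.length) 2]
      simp
    · have hc2 : c = 'B' ∨ c = 'R' := by
        rcases hval c List.mem_cons_self with h | h | h | h
        · exact absurd (Or.inl h) hc
        · exact absurd (Or.inr h) hc
        · exact Or.inl h
        · exact Or.inr h
      simp only [pvRun, pvBinVal, hc, hc2, if_neg, if_pos, not_false_iff, ih _ hval']
      have h1 : n - n / 2 + pvBinVal cs = (n + (1 + 2 * pvBinVal cs)) / 2 := by omega
      rw [h1, Nat.div_div_eq_div_mul, List.length_cons, pow_succ,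
        Nat.mul_comm (2 ^ cs.length) 2]

theorem pvRun_lo_bound : ∀ (cs : List Char) (n : Nat),
    (pvRun cs n).1 + (pvRun cs n).2 ≤ n := by
  intro cs
  induction cs with
  | nil => intro n; simp [pvRun]
  | cons c cs ih =>
    intro n
    by_cases hc : c = 'F' ∨ c = 'L'
    · simp only [pvRun, hc, if_pos]
      have := ih (n / 2); omega
    · simp only [pvRun, hc, if_neg, not_false_iff]
      have := ih (n - n / 2); omega

theorem bspA_cons (c : Char) (l : List Char) (hl : l ≠ []) (array : List Int) :
    bspA (c :: l) array =
      if c = 'F' ∨ c = 'L' then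
        bspA l (PySem.List.slice array (some ((0 : Nat) : Int)) (some ((array.length / 2 : Nat) : Int)))
      else if c = 'B' ∨ c = 'R' then
        bspA l (PySem.List.slice array (some ((array.length / 2 : Nat) : Int)) (some ((array.length : Nat) : Int)))
      else 0 := by
  cases l with
  | nil => exact absurd rfl hl
  | cons x xs => rfl

theorem bspA_main : ∀ (cs : List Char) (d : Char) (array : List Int),
    (∀ c ∈ cs, c = 'F' ∨ c = 'L' ∨ c = 'B' ∨ c = 'R') →
    1 ≤ (pvRun cs array.length).2 →
    bspA (cs ++ [d]) array = (array[(pvRun cs array.length).1]?).getD 0 := by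
  intro cs
  induction cs with
  | nil =>
    intro d array _ _
    simp [bspA, pvRun, PySem.List.pyGet?_zero]
  | cons c cs ih =>
    intro d array hval hsz
    have hne : cs ++ [d] ≠ [] := by simp
    rw [List.cons_append, bspA_cons c (cs ++ [d]) hne array]
    have hval' : ∀ x ∈ cs, x = 'F' ∨ x = 'L' ∨ x = 'B' ∨ x = 'R' := by
      intro x hx; exact hval x (List.mem_cons_of_mem _ hx)
    have hb := pvRun_lo_bound cs
    by_cases hc : c = 'F' ∨ c = 'L'
    · rw [if_pos hc]
      have hrun : pvRun (c :: cs) array.length = pvRun cs (array.length / 2) := by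
        simp [pvRun, hc]
      rw [hrun] at hsz ⊢
      have hslice : PySem.List.slice array (some ((0 : Nat) : Int)) (some ((array.length / 2 : Nat) : Int))
          = array.take (array.length / 2) := by
        rw [PySem.List.slice_natCast]; simp
      rw [hslice]
      have hlen : (array.take (array.length / 2)).length = array.length / 2 := by
        simp [Nat.min_eq_left (Nat.div_le_self _ _)]
      have := ih d (array.take (array.length / 2)) hval' (by rw [hlen]; exact hsz)
      rw [hlen] at this
      rw [this]
      have hlt : (pvRun cs (array.length / 2)).1 < array.length / 2 := by
        have := hb (array.length / 2); omega
      rw [List.getElem?_take, if_pos hlt]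
    · have hc2 : c = 'B' ∨ c = 'R' := by
        rcases hval c (List.mem_cons_self) with h | h | h | h
        · exact absurd (Or.inl h) hc
        · exact absurd (Or.inr h) hc
        · exact Or.inl h
        · exact Or.inr h
      rw [if_neg hc, if_pos hc2]
      have hrun : pvRun (c :: cs) array.length
          = (array.length / 2 + (pvRun cs (array.length - array.length / 2)).1,
             (pvRun cs (array.length - array.length / 2)).2) := by
        simp [pvRun, hc]
      rw [hrun] at hsz ⊢
      have hslice : PySem.List.slice array (some ((array.length / 2 : Nat) : Int)) (some ((array.length : Nat) : Int))
          = (array.drop (array.length / 2)).take (array.length - array.length / 2) := by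
        rw [PySem.List.slice_natCast]
      rw [hslice]
      have hlen : ((array.drop (array.length / 2)).take (array.length - array.length / 2)).length
          = array.length - array.length / 2 := by simp
      have := ih d _ hval' (by rw [hlen]; exact hsz)
      rw [hlen] at this
      rw [this]
      have htk : (array.drop (array.length / 2)).take (array.length - array.length / 2)
          = array.drop (array.length / 2) := by
        apply List.take_of_length_le; simp
      rw [htk, List.getElem?_drop]

theorem fold_run : ∀ (cs : List Char) (a n : Nat),
    (∀ c ∈ cs, c = 'F' ∨ c = 'L' ∨ c = 'B' ∨ c = 'R') →
    cs.foldl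
      (fun (st : Option (Int × Int)) c =>
        st.bind (fun s =>
          if c = 'F' ∨ c = 'L' then some (s.1, s.1 + PySem.Int.floordiv (s.2 - s.1) 2)
          else if c = 'B' ∨ c = 'R' then some (s.1 + PySem.Int.floordiv (s.2 - s.1) 2, s.2)
          else none))
      (some (((a : Nat) : Int), ((a : Nat) : Int) + ((n : Nat) : Int)))
    = some (((a + (pvRun cs n).1 : Nat) : Int), ((a + (pvRun cs n).1 + (pvRun cs n).2 : Nat) : Int)) := by
  intro cs
  induction cs with
  | nil => intro a n _; simp [pvRun]
  | cons c cs ih =>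
    intro a n hval
    have hval' : ∀ x ∈ cs, x = 'F' ∨ x = 'L' ∨ x = 'B' ∨ x = 'R' := by
      intro x hx; exact hval x (List.mem_cons_of_mem _ hx)
    rw [List.foldl_cons]
    have hfd : PySem.Int.floordiv (((a : Nat) : Int) + ((n : Nat) : Int) - ((a : Nat) : Int)) 2
        = ((n / 2 : Nat) : Int) := by
      have h1 : ((a : Nat) : Int) + ((n : Nat) : Int) - ((a : Nat) : Int) = ((n : Nat) : Int) := by ring
      rw [h1]
      exact_mod_cast PySem.Int.floordiv_natCast n 2
    by_cases hc : c = 'F' ∨ c = 'L'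
    · simp only [Option.bind_some, if_pos hc, hfd]
      have := ih a (n / 2) hval'
      rw [this]
      simp [pvRun, hc]
    · have hc2 : c = 'B' ∨ c = 'R' := by
        rcases hval c List.mem_cons_self with h | h | h | h
        · exact absurd (Or.inl h) hc
        · exact absurd (Or.inr h) hc
        · exact Or.inl h
        · exact Or.inr h
      simp only [Option.bind_some, if_neg hc, if_pos hc2, hfd]
      have h2 : (((a : Nat) : Int) + ((n / 2 : Nat) : Int), ((a : Nat) : Int) + ((n : Nat) : Int))
          = (((a + n / 2 : Nat) : Int), ((a + n / 2 : Nat) : Int) + ((n - n / 2 : Nat) : Int)) := by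
        simp only [Prod.mk.injEq]
        omega
      rw [h2, ih (a + n / 2) (n - n / 2) hval']
      simp only [pvRun, hc, if_neg, not_false_iff]
      simp only [Prod.mk.injEq, Option.some.injEq]
      omega

-- ===== VERDICT (by name: the statement is the Claim_ definition above) =====
theorem bsp_spec : Claim_equal_bsp := by
  intro string arr _ hpre
  obtain ⟨hne, hvalb, hlen⟩ := hpre
  have hval : ∀ c ∈ string.toList.dropLast, c = 'F' ∨ c = 'L' ∨ c = 'B' ∨ c = 'R' := by
    intro c hc
    have := List.all_eq_true.mp hvalb c hc
    simpa [or_assoc] using this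
  unfold Spec_bsp bsp
  set cs := string.toList.dropLast with hcs
  have hdecomp : string.toList = cs ++ [string.toList.getLast hne] :=
    (List.dropLast_append_getLast hne).symm
  have hsz : 1 ≤ (pvRun cs arr.length).2 := by
    rw [pvRun_size cs arr.length (fun c hc => hval c hc)]
    rw [Nat.le_div_iff_mul_le (pow_pos (by norm_num : (0:ℕ) < 2) _)]
    omega
  have hA := bspA_main cs (string.toList.getLast hne) arr
      (fun c hc => hval c hc) hsz
  have hB : bsp_alt string arr
      = (PySem.List.pyGet? arr (((pvRun cs arr.length).1 : Nat) : Int)).getD 0 := by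
    simp only [bsp_alt, ← hcs]
    have hF := fold_run cs 0 arr.length (fun c hc => hval c hc)
    simp only [Nat.cast_zero, zero_add] at hF ⊢
    rw [hF]
  rw [hdecomp, hA, hB]
  simp [PySem.List.pyGet?_natCast]
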